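-- pv_equiv track=rewrite | github.com/Sheldo-sudo/GoT-Experiment | examples/graphwiz/topology_task.py | _normalize_preference_orders
-- ===== SOURCE A (Python) =====
-- from typing import Any, Dict, List, Optional, Tuple
--
-- def _normalize_preference_orders(n: int, preferred_orders: List[List[int]]) -> List[Dict[int, int]]:
--     """
--     把候选序列变成位置映射，只保留 [0, n-1] 且不重复的节点。
--     """
--     rank_maps: List[Dict[int, int]] = []
--
--     for order in preferred_orders:
--         seen = set()
--         filtered: List[int] = []
--         for x in order:
--             if not isinstance(x, int):
--                 continue
--             if x < 0 or x >= n: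
--                 continue
--             if x in seen:
--                 continue
--             seen.add(x)
--             filtered.append(x)
--
--         if filtered:
--             rank_maps.append({node: idx for idx, node in enumerate(filtered)})
--
--     return rank_maps
-- ===== SOURCE B (Python) =====
-- from typing import List, Dict
--
-- def _normalize_preference_orders(n: int, preferred_orders: List[List[int]]) -> List[Dict[int, int]]:
--     # Recursive over the orders; per order: keep an element iff it is a valid
--     # node AND this is its first occurrence (no earlier copy in the prefix
--     # order[:i]); ranks are recovered with list.index instead of enumeration.
--     if not preferred_orders:
--         return []
--     order = preferred_orders[0]
--     deduped = [x for i, x in enumerate(order)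
--                if isinstance(x, int) and 0 <= x < n and x not in order[:i]]
--     rest = _normalize_preference_orders(n, preferred_orders[1:])
--     return ([{x: deduped.index(x) for x in deduped}] if deduped else []) + rest
-- ===== Notes on version B (the rewrite author's own statement) =====
-- stated objective: alternative
-- what changed: A's single stateful pass per order (mutable seen-set + filtered accumulator, appended into an outer loop) is replaced by recursion over the orders with a stateless first-occurrence characterisation: an element is kept iff it is valid and absent from the prefix order[:i], and ranks are recomputed with list.index instead of being carried by enumeration.
import Mathlib
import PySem

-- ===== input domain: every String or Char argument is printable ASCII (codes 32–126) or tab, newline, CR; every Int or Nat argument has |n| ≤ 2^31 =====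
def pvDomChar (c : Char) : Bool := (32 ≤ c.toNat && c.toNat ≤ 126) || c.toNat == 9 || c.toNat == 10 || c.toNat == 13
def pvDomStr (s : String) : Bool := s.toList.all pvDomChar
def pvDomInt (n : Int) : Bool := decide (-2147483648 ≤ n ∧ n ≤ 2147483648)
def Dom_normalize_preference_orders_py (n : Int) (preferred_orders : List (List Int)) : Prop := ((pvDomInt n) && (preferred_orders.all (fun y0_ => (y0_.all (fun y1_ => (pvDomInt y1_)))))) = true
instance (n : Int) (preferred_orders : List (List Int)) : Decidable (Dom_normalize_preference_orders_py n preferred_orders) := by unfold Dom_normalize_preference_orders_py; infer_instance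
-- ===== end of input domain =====

-- B replaces A's stateful seen-set pass by recursion over the orders with a stateless
-- first-occurrence filter (x kept iff valid and absent from order[:i]) and list.index ranks
-- (objective: alternative). Since inputs are typed List Int, Python's isinstance guard is always true.

-- ===== PORT A =====
-- inner loop of A: walks the order keeping the `seen` set and the `filtered` accumulator
def pvALoop (n : Int) : List Int → PySem.Set Int → List Int → List Int
  | [], _, filtered => filtered
  | x :: rest, seen, filtered =>
    if decide (x < 0) || decide (n ≤ x) then pvALoop n rest seen filtered
    else if PySem.Set.contains seen x then pvALoop n rest seen filtered
    else pvALoop n rest (PySem.Set.add seen x) (filtered ++ [x])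

def normalize_preference_orders_py (n : Int) (preferred_orders : List (List Int)) : List (List (Int × Int)) :=
  preferred_orders.foldl (fun rank_maps order =>
    let filtered := pvALoop n order PySem.Set.empty []
    if filtered ≠ [] then
      rank_maps ++ [(PySem.List.enumerate filtered).map (fun p => (p.2, p.1))]
    else rank_maps) []

-- ===== PORT B =====
-- Source B's comprehension: keep x from enumerate(order) iff 0 <= x < n and x not in order[:i]
def pvDedupB (n : Int) (order : List Int) : List Int :=
  ((PySem.List.enumerate order).filter
    (fun p => decide (0 ≤ p.2) && decide (p.2 < n) && !((PySem.List.slice order none (some p.1)).contains p.2))).map (fun p => p.2)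

-- Source B's {x: deduped.index(x) for x in deduped}; x ∈ deduped so index? is some, getD totalizes
def pvRankB (d : List Int) : List (Int × Int) :=
  d.map (fun x => (x, (((PySem.List.index? d x).getD 0 : Nat) : Int)))

def normalize_preference_orders_py_alt (n : Int) (preferred_orders : List (List Int)) : List (List (Int × Int)) :=
  match preferred_orders with
  | [] => []
  | order :: rest =>
    let deduped := pvDedupB n order
    (if deduped ≠ [] then [pvRankB deduped] else []) ++ normalize_preference_orders_py_alt n rest

-- ===== PRECONDITION & SPEC =====
def Spec_normalize_preference_orders_py (n : Int) (preferred_orders : List (List Int)) (out : List (List (Int × Int))) : Prop := out = normalize_preference_orders_py_alt n preferred_orders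
instance (n : Int) (preferred_orders : List (List Int)) (out : List (List (Int × Int))) : Decidable (Spec_normalize_preference_orders_py n preferred_orders out) := by unfold Spec_normalize_preference_orders_py; infer_instance

-- ===== CLAIM (what is proved, stated in full; the proofs are below) =====
def Claim_equal_normalize_preference_orders_py : Prop := ∀ (n : Int) (preferred_orders : List (List Int)), Dom_normalize_preference_orders_py n preferred_orders → Spec_normalize_preference_orders_py n preferred_orders (normalize_preference_orders_py n preferred_orders)

-- ===== LEMMAS AND PROOFS =====

-- canonical per-order dedup: seen prefix grows by EVERY element, kept iff valid and unseen
def pvCanon (n : Int) : List Int → List Int → List Int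
  | [], _ => []
  | x :: xs, pre =>
    if decide (0 ≤ x) && decide (x < n) && !(pre.contains x) then
      x :: pvCanon n xs (pre ++ [x])
    else pvCanon n xs (pre ++ [x])

-- A's inner loop equals pvCanon, provided seen and pre agree on valid elements
theorem pvALoop_eq_canon (n : Int) (xs : List Int) : ∀ (seen pre acc : List Int),
    (∀ y : Int, 0 ≤ y → y < n → (y ∈ seen ↔ y ∈ pre)) →
    pvALoop n xs seen acc = acc ++ pvCanon n xs pre := by
  induction xs with
  | nil => intro seen pre acc _; simp [pvALoop, pvCanon]
  | cons x rest ih =>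
    intro seen pre acc h
    by_cases hv : 0 ≤ x ∧ x < n
    · have hc1 : (decide (x < 0) || decide (n ≤ x)) = false := by simp; omega
      have hc2 : (decide (0 ≤ x) && decide (x < n)) = true := by simp; omega
      simp only [pvALoop, hc1, Bool.false_eq_true, if_false]
      by_cases hm : x ∈ seen
      · have hpre : x ∈ pre := (h x hv.1 hv.2).mp hm
        have hcon : PySem.Set.contains seen x = true := by
          simp [PySem.Set.contains, hm]
        have hkeep : (decide (0 ≤ x) && decide (x < n) && !(pre.contains x)) = false := by
          simp [hpre]
        simp only [hcon, if_true, pvCanon, hkeep, Bool.false_eq_true, if_false]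
        exact ih seen (pre ++ [x]) acc (by
          intro y h1 h2
          rw [h y h1 h2]
          constructor
          · intro hy; exact List.mem_append_left _ hy
          · intro hy
            rcases List.mem_append.mp hy with hy | hy
            · exact hy
            · simp at hy; subst hy; exact ((h y h1 h2).mp hm))
      · have hpre : x ∉ pre := fun hx => hm ((h x hv.1 hv.2).mpr hx)
        have hcon : PySem.Set.contains seen x = false := by
          simp [PySem.Set.contains, hm]
        have hkeep : (decide (0 ≤ x) && decide (x < n) && !(pre.contains x)) = true := by
          simp [hpre]; omega
        simp only [hcon, Bool.false_eq_true, if_false, pvCanon, hkeep, if_true]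
        rw [ih (PySem.Set.add seen x) (pre ++ [x]) (acc ++ [x]) (by
          intro y h1 h2
          have hy := h y h1 h2
          simp [PySem.Set.add, PySem.Set.contains, hm, hy])]
        simp
    · have hc1 : (decide (x < 0) || decide (n ≤ x)) = true := by simp; omega
      have hkeep : (decide (0 ≤ x) && decide (x < n) && !(pre.contains x)) = false := by
        simp; intro h1 h2; omega
      simp only [pvALoop, hc1, if_true, pvCanon, hkeep, Bool.false_eq_true, if_false]
      exact ih seen (pre ++ [x]) acc (by
        intro y h1 h2
        rw [h y h1 h2]
        have hne : y ≠ x := by omega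
        simp [hne])

-- B's enumerate/slice comprehension equals pvCanon (generalized over the consumed prefix)
theorem pvDedupB_aux (n : Int) (xs : List Int) : ∀ (pre : List Int),
    ((PySem.List.enumerate xs (pre.length : Int)).filter
      (fun p => decide (0 ≤ p.2) && decide (p.2 < n) &&
        !((PySem.List.slice (pre ++ xs) none (some p.1)).contains p.2))).map (fun p => p.2)
    = pvCanon n xs pre := by
  induction xs with
  | nil => intro pre; simp [PySem.List.enumerate_nil, pvCanon]
  | cons x rest ih =>
    intro pre
    have hslice : PySem.List.slice (pre ++ x :: rest) none (some (pre.length : Int)) = pre := by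
      rw [PySem.List.slice_to_natCast]
      exact List.take_left
    have hassoc : pre ++ x :: rest = (pre ++ [x]) ++ rest := by simp
    have hlen : (pre.length : Int) + 1 = ((pre ++ [x]).length : Int) := by simp
    rw [PySem.List.enumerate_cons, List.filter_cons, hslice, hassoc, hlen]
    by_cases hk : (decide (0 ≤ x) && decide (x < n) && !(pre.contains x)) = true
    · rw [if_pos hk, List.map_cons, ih (pre ++ [x])]
      simp only [pvCanon, hk, if_true]
    · rw [if_neg hk, ih (pre ++ [x])]
      simp only [pvCanon]
      rw [if_neg hk]

theorem pvDedupB_eq_canon (n : Int) (order : List Int) :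
    pvDedupB n order = pvCanon n order [] := by
  have := pvDedupB_aux n order []
  simpa [pvDedupB] using this

-- A's filtered list equals B's deduped list
theorem pvFiltered_eq_dedupB (n : Int) (order : List Int) :
    pvALoop n order PySem.Set.empty [] = pvDedupB n order := by
  rw [pvDedupB_eq_canon]
  simpa using pvALoop_eq_canon n order PySem.Set.empty [] [] (by simp [PySem.Set.empty])

-- A's filtered list has no duplicates (it is an ordered dedup)
theorem pvALoop_eq_ofList (n : Int) (xs : List Int) : ∀ (s : List Int),
    pvALoop n xs s s = (xs.filter (fun x => decide (0 ≤ x) && decide (x < n))).foldl PySem.Set.add s := by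
  induction xs with
  | nil => intro s; simp [pvALoop]
  | cons x rest ih =>
    intro s
    by_cases hx : 0 ≤ x ∧ x < n
    · have hcond : (decide (x < 0) || decide (n ≤ x)) = false := by simp; omega
      simp only [pvALoop, hcond, Bool.false_eq_true, if_false, List.filter_cons]
      have hkeep : (decide (0 ≤ x) && decide (x < n)) = true := by simp; omega
      rw [hkeep]
      by_cases hm : x ∈ s
      · simp [PySem.Set.contains, PySem.Set.add, hm, ih]
      · simp [PySem.Set.contains, PySem.Set.add, hm, ih]
    · have hcond : (decide (x < 0) || decide (n ≤ x)) = true := by simp; omega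
      have hdrop : (decide (0 ≤ x) && decide (x < n)) = false := by simp; omega
      simp only [pvALoop, hcond, if_true, List.filter_cons, hdrop, Bool.false_eq_true, if_false]
      exact ih s

theorem pvFiltered_nodup (n : Int) (order : List Int) :
    (pvALoop n order PySem.Set.empty []).Nodup := by
  have h := pvALoop_eq_ofList n order []
  simp only [PySem.Set.empty] at *
  rw [h, ← PySem.Set.ofList_eq_foldl]
  exact PySem.Set.nodup_ofList _

-- on a nodup list, the index-based rank map equals the enumerate-based one
theorem pvRankB_eq_enumerate (d : List Int) (hd : d.Nodup) :
    pvRankB d = (PySem.List.enumerate d).map (fun p => (p.2, p.1)) := by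
  unfold pvRankB
  apply List.ext_getElem
  · simp [PySem.List.length_enumerate]
  · intro j h1 h2
    have hlt : j < d.length := by simpa using h1
    simp only [List.getElem_map, PySem.List.getElem_enumerate]
    have hidx : List.idxOf? (d[j]'hlt) d = some j := by
      rw [List.idxOf?_eq_some_iff]
      refine ⟨hlt, rfl, ?_⟩
      intro k hk hc
      have hkj : d[k]'(by omega) = d[j]'hlt := by simpa using hc
      have := (List.Nodup.getElem_inj_iff hd).mp hkj
      omega
    simp [PySem.List.index?_eq_idxOf?, hidx]

-- outer: A's append-accumulator fold equals B's recursion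
theorem pvOuter (n : Int) (orders : List (List Int)) : ∀ (acc : List (List (Int × Int))),
    orders.foldl (fun rank_maps order =>
      let filtered := pvALoop n order PySem.Set.empty []
      if filtered ≠ [] then
        rank_maps ++ [(PySem.List.enumerate filtered).map (fun p => (p.2, p.1))]
      else rank_maps) acc
    = acc ++ normalize_preference_orders_py_alt n orders := by
  induction orders with
  | nil => intro acc; simp [normalize_preference_orders_py_alt]
  | cons o rest ih =>
    intro acc
    simp only [List.foldl_cons, normalize_preference_orders_py_alt]
    have hfd : pvALoop n o PySem.Set.empty [] = pvDedupB n o := pvFiltered_eq_dedupB n o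
    have hnd : (pvALoop n o PySem.Set.empty []).Nodup := pvFiltered_nodup n o
    by_cases h : pvDedupB n o = []
    · rw [if_neg (by rw [hfd, h]; simp), ih]
      simp [h]
    · have hrank : (PySem.List.enumerate (pvALoop n o PySem.Set.empty [])).map (fun p => (p.2, p.1))
          = pvRankB (pvDedupB n o) := by
        rw [pvRankB_eq_enumerate _ (hfd ▸ hnd), hfd]
      rw [if_pos (by rw [hfd]; exact h), ih, if_pos h, hrank]
      simp

-- ===== VERDICT (by name: the statement is the Claim_ definition above) =====
theorem normalize_preference_orders_py_spec : Claim_equal_normalize_preference_orders_py := by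
  intro n orders _
  unfold Spec_normalize_preference_orders_py normalize_preference_orders_py
  simpa using pvOuter n orders []
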